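-- pv_equiv track=rewrite | github.com/zagnut999/aoc | aoc2024/Day04/day04.py | diag_down_slice
-- ===== SOURCE A (Python) =====
-- def diag_down_slice(lines):
--     all_lines: list[str] = []
--     # up
--     for j in range(len(lines) -1, -1, -1):
--         line = ""
--         i = 0
--         for jj in range(j, len(lines)):
--             line += lines[jj][i]
--             i += 1
--             if i >= len(lines[0]):
--                 break
--
--         all_lines.append(line)
--         all_lines.append(line[::-1])
--
--     # across
--     for i in range(1, len(lines[0])):  # zero was done above
--         line = ""
--         j = 0
--         for ii in range(i, len(lines[0])):
--             line += lines[j][ii]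
--             j += 1
--
--         all_lines.append(line)
--         all_lines.append(line[::-1])
--
--     return all_lines
-- ===== SOURCE B (Python) =====
-- def diag_down_slice(lines):
--     height = len(lines)
--     width = len(lines[0])
--     buckets = {}
--     for r in range(height):
--         row = lines[r]
--         for c in range(width):
--             buckets.setdefault(c - r, []).append(row[c])
--     all_lines = []
--     for d in range(-(height - 1), width):
--         s = "".join(buckets.get(d, []))
--         all_lines.append(s)
--         all_lines.append(s[::-1])
--     return all_lines
-- ===== Notes on version B (the rewrite author's own statement) =====
-- stated objective: idiomatic
-- what changed: replaces A's two families of per-diagonal nested scans (with manual index increments and a break) by one sweep over all cells into a dict of diagonal buckets keyed by c-r, then emits each bucket and its reverse in key order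
-- crash fix: A raises IndexError on nonempty grids (all rows at least as long as the first) whose first-row width is zero or exceeds height+1 (its top-edge loop never bounds the row index); B returns the down-diagonals of the width-wide rectangle there. — e.g. on diag_down_slice(["abc"]): A raises IndexError, B returns ["a", "a", "b", "b", "c", "c"]
import Mathlib
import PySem

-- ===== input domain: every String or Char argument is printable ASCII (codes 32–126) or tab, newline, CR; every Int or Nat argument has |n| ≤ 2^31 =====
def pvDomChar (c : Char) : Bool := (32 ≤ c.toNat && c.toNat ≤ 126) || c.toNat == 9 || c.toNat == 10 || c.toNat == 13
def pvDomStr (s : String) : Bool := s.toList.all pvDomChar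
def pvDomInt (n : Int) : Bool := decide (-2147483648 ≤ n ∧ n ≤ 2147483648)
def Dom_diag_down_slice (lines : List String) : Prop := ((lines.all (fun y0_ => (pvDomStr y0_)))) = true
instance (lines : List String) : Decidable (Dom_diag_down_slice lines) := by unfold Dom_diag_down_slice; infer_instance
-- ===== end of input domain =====

-- B replaces A's two families of per-diagonal scans by one sweep into a dict of diagonal buckets keyed by c-r (idiomatic; same cost).
-- Both ports build each diagonal as a List Char and wrap it with String.ofList at the end (exact: Python's `line += ch` on strings).

-- ===== PORT A =====
-- inner loop `for jj in range(j, len(lines)): line += lines[jj][i]; i += 1; if i >= len(lines[0]): break`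
def upGo (rows : List (List Char)) (w : Int) : List Int → Int → List Char
  | [], _ => []
  | jj :: rest, i =>
    let ch := PySem.List.pyGetD (PySem.List.pyGetD rows jj []) i ' '
    if w ≤ i + 1 then [ch] else ch :: upGo rows w rest (i + 1)

-- inner loop `for ii in range(i, len(lines[0])): line += lines[j][ii]; j += 1`
def acrossGo (rows : List (List Char)) : List Int → Int → List Char
  | [], _ => []
  | ii :: rest, j =>
    PySem.List.pyGetD (PySem.List.pyGetD rows j []) ii ' ' :: acrossGo rows rest (j + 1)

def diag_down_slice (lines : List String) : List String :=
  let rows := lines.map String.toList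
  let h : Int := (rows.length : Int)
  let w : Int := ((PySem.List.pyGetD rows 0 []).length : Int)
  let up := (PySem.List.pyRange (h - 1) (-1) (-1)).foldl (fun acc j =>
      let line := upGo rows w (PySem.List.pyRange j h 1) 0
      acc ++ [String.ofList line, String.ofList line.reverse]) []
  (PySem.List.pyRange 1 w 1).foldl (fun acc i =>
      let line := acrossGo rows (PySem.List.pyRange i w 1) 0
      acc ++ [String.ofList line, String.ofList line.reverse]) up

-- ===== PORT B =====
-- one sweep `buckets.setdefault(c - r, []).append(row[c])` = Dict.modify with default [] appending
def diag_down_slice_alt (lines : List String) : List String :=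
  let rows := lines.map String.toList
  let h : Int := (rows.length : Int)
  let w : Int := ((PySem.List.pyGetD rows 0 []).length : Int)
  let buckets := (PySem.List.pyRange 0 h 1).foldl (fun b r =>
      let row := PySem.List.pyGetD rows r []
      (PySem.List.pyRange 0 w 1).foldl
        (fun (b : PySem.Dict Int (List Char)) c =>
          b.modify (c - r) [] (fun l => l ++ [PySem.List.pyGetD row c ' '])) b)
    PySem.Dict.empty
  (PySem.List.pyRange (-(h - 1)) w 1).foldl (fun acc d =>
      let s := buckets.getD d []
      acc ++ [String.ofList s, String.ofList s.reverse]) []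

-- ===== PRECONDITION & SPEC =====
-- Pre_ is exactly where the Python A returns: a nonempty grid whose first row has width w with 1 ≤ w ≤ height+1
-- and every row at least w long (A reads every cell (r,c) with c < w, and its top-edge loop walks the row index
-- up to w-2 without a bound).
def Pre_diag_down_slice (lines : List String) : Prop :=
  lines ≠ [] ∧ 1 ≤ PySem.Str.len (lines.headD "") ∧
  PySem.Str.len (lines.headD "") ≤ (lines.length : Int) + 1 ∧
  ∀ l ∈ lines, PySem.Str.len (lines.headD "") ≤ PySem.Str.len l
instance (lines : List String) : Decidable (Pre_diag_down_slice lines) := by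
  unfold Pre_diag_down_slice; infer_instance
def pvWitness_diag_down_slice : List String := ["ab", "cd"]

-- A raises IndexError on nonempty grids (all rows at least as long as the first) whose first-row width is zero or
-- exceeds height+1; B returns the down-diagonals of the width-wide rectangle there.
def Raises_diag_down_slice (lines : List String) : Prop :=
  lines ≠ [] ∧ (∀ l ∈ lines, PySem.Str.len (lines.headD "") ≤ PySem.Str.len l) ∧
  (PySem.Str.len (lines.headD "") = 0 ∨ (lines.length : Int) + 1 < PySem.Str.len (lines.headD ""))
instance (lines : List String) : Decidable (Raises_diag_down_slice lines) := by
  unfold Raises_diag_down_slice; infer_instance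
def pvRaiseWitness_diag_down_slice : List String := ["abc"]
def pvRaiseWitnessOut_diag_down_slice : List String := ["a", "a", "b", "b", "c", "c"]

def Spec_diag_down_slice (lines : List String) (out : List String) : Prop := out = diag_down_slice_alt lines
instance (lines : List String) (out : List String) : Decidable (Spec_diag_down_slice lines out) := by
  unfold Spec_diag_down_slice; infer_instance

-- ===== CLAIM (what is proved, stated in full; the proofs are below) =====
def Claim_equal_diag_down_slice : Prop := ∀ (lines : List String), Dom_diag_down_slice lines → Pre_diag_down_slice lines → Spec_diag_down_slice lines (diag_down_slice lines)
def Claim_raises_diag_down_slice : Prop := (∀ (lines : List String), Dom_diag_down_slice lines → Raises_diag_down_slice lines → ¬ Pre_diag_down_slice lines) ∧ (Dom_diag_down_slice (pvRaiseWitness_diag_down_slice) ∧ Raises_diag_down_slice (pvRaiseWitness_diag_down_slice) ∧ diag_down_slice_alt (pvRaiseWitness_diag_down_slice) = pvRaiseWitnessOut_diag_down_slice)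

-- ===== LEMMAS AND PROOFS =====

-- the diagonal through column d of the first row of `rows`, read top to bottom, keeping columns in [0, w)
def diagSpec (w : Int) : List (List Char) → Int → List Char
  | [], _ => []
  | row :: rest, d =>
    (if 0 ≤ d ∧ d < w then [PySem.List.pyGetD row d ' '] else []) ++ diagSpec w rest (d + 1)

theorem diagSpec_of_le (w : Int) (rows : List (List Char)) (d : Int) (h : w ≤ d) :
    diagSpec w rows d = [] := by
  induction rows generalizing d with
  | nil => rfl
  | cons row rest ih =>
      simp [diagSpec, ih (d + 1) (by omega)]
      omega

theorem diagSpec_neg (w : Int) (rows : List (List Char)) (j : Nat) :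
    diagSpec w rows (-(j : Int)) = diagSpec w (rows.drop j) 0 := by
  induction j generalizing rows with
  | zero => simp
  | succ k ih =>
      cases rows with
      | nil => simp [diagSpec]
      | cons row rest =>
          have h1 : ¬ (0 ≤ -((k : Int) + 1) ∧ -((k : Int) + 1) < w) := by omega
          have : (-(((k : Nat) + 1 : Nat) : Int)) = -((k : Int) + 1) := by push_cast; ring
          rw [this]
          simp only [diagSpec, if_neg h1, List.nil_append]
          have : -((k : Int) + 1) + 1 = -(k : Int) := by ring
          rw [this, ih rest]
          simp

theorem flatMap_congr' {α β : Type} (l : List α) (f g : α → List β)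
    (h : ∀ x ∈ l, f x = g x) : l.flatMap f = l.flatMap g := by
  induction l with
  | nil => rfl
  | cons x xs ih => simp [List.flatMap_cons, h x (by simp), ih fun y hy => h y (by simp [hy])]

theorem upGo_eq (rows : List (List Char)) (w : Int) :
    ∀ (tail : List (List Char)) (j i : Int), 0 ≤ j → rows.drop j.toNat = tail →
      0 ≤ i → i < w →
      upGo rows w (PySem.List.pyRange j (rows.length : Int) 1) i = diagSpec w tail i := by
  intro tail
  induction tail with
  | nil =>
      intro j i h0 hdrop _ _
      have hle : (rows.length : Int) ≤ j := by
        have := List.drop_eq_nil_iff.mp hdrop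
        omega
      rw [PySem.List.pyRange_one_eq_nil hle]
      rfl
  | cons row rest ih =>
      intro j i h0 hdrop h0i hiw
      have hlt : j.toNat < rows.length := by
        by_contra h
        rw [List.drop_eq_nil_of_le (by omega)] at hdrop
        exact absurd hdrop.symm (List.cons_ne_nil _ _)
      have hcons := List.drop_eq_getElem_cons hlt
      rw [hdrop] at hcons
      have hrow : PySem.List.pyGetD rows j [] = row := by
        rw [PySem.List.pyGetD_eq_getElem rows [] h0 (by omega)]
        exact (List.cons.injEq _ _ _ _ ▸ hcons).1.symm
      have hrest : rows.drop (j + 1).toNat = rest := by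
        have h1 : (j + 1).toNat = j.toNat + 1 := by omega
        rw [h1]
        exact ((List.cons.injEq _ _ _ _ ▸ hcons).2).symm
      rw [PySem.List.pyRange_one_cons (by omega)]
      simp only [upGo]
      by_cases hb : w ≤ i + 1
      · rw [if_pos hb]
        simp [diagSpec, if_pos (And.intro h0i hiw), diagSpec_of_le w rest (i + 1) (by omega), hrow]
      · rw [if_neg hb, ih (j + 1) (i + 1) (by omega) hrest (by omega) (by omega)]
        simp [diagSpec, if_pos (And.intro h0i hiw), hrow]

theorem acrossGo_eq (rows : List (List Char)) (w : Int) :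
    ∀ (tail : List (List Char)) (j i : Int), 0 ≤ j → rows.drop j.toNat = tail →
      0 ≤ i → w - i ≤ (tail.length : Int) →
      acrossGo rows (PySem.List.pyRange i w 1) j = diagSpec w tail i := by
  intro tail
  induction tail with
  | nil =>
      intro j i _ _ _ hle
      simp only [List.length_nil, Nat.cast_zero] at hle
      rw [PySem.List.pyRange_one_eq_nil (by omega)]
      rfl
  | cons row rest ih =>
      intro j i h0j hdrop h0i hle
      by_cases hiw : i < w
      · have hlt : j.toNat < rows.length := by
          by_contra h
          rw [List.drop_eq_nil_of_le (by omega)] at hdrop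
          exact absurd hdrop.symm (List.cons_ne_nil _ _)
        have hcons := List.drop_eq_getElem_cons hlt
        rw [hdrop] at hcons
        have hrow : PySem.List.pyGetD rows j [] = row := by
          rw [PySem.List.pyGetD_eq_getElem rows [] h0j (by omega)]
          exact (List.cons.injEq _ _ _ _ ▸ hcons).1.symm
        have hrest : rows.drop (j + 1).toNat = rest := by
          have h1 : (j + 1).toNat = j.toNat + 1 := by omega
          rw [h1]
          exact ((List.cons.injEq _ _ _ _ ▸ hcons).2).symm
        rw [PySem.List.pyRange_one_cons hiw]
        simp only [acrossGo]
        rw [ih (j + 1) (i + 1) (by omega) hrest (by omega) (by simp at hle ⊢; omega)]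
        simp [diagSpec, if_pos (And.intro h0i hiw), hrow]
      · rw [PySem.List.pyRange_one_eq_nil (by omega)]
        rw [diagSpec_of_le w _ i (by omega)]
        rfl

theorem inner_bucket (row : List Char) (r d : Int) (b : PySem.Dict Int (List Char)) :
    ∀ (n : Nat),
      (((PySem.List.pyRange 0 (n : Int) 1).foldl
        (fun (b : PySem.Dict Int (List Char)) c =>
          b.modify (c - r) [] (fun l => l ++ [PySem.List.pyGetD row c ' '])) b).getD d [])
      = b.getD d [] ++ (if 0 ≤ d + r ∧ d + r < (n : Int) then [PySem.List.pyGetD row (d + r) ' '] else []) := by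
  intro n
  induction n with
  | zero => simp [PySem.List.pyRange_one_eq_nil]
  | succ m ih =>
      have hcast : (((m + 1 : Nat)) : Int) = (m : Int) + 1 := by push_cast; ring
      rw [hcast, PySem.List.pyRange_one_succ_right (by positivity), List.foldl_append]
      simp only [List.foldl_cons, List.foldl_nil]
      rw [PySem.Dict.getD_modify]
      by_cases hd : d = (m : Int) - r
      · have h1 : d + r = (m : Int) := by omega
        rw [if_pos hd, ← hd, ih,
            if_neg (show ¬(0 ≤ d + r ∧ d + r < (m : Int)) by omega),
            if_pos (show 0 ≤ d + r ∧ d + r < (m : Int) + 1 by omega), h1]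
        simp
      · rw [if_neg hd, ih]
        by_cases h2 : 0 ≤ d + r ∧ d + r < (m : Int)
        · rw [if_pos h2, if_pos (show 0 ≤ d + r ∧ d + r < (m : Int) + 1 by omega)]
        · rw [if_neg h2, if_neg (show ¬(0 ≤ d + r ∧ d + r < (m : Int) + 1) by omega)]

theorem outer_bucket (rows : List (List Char)) (wn : Nat) (d : Int) :
    ∀ (tail : List (List Char)) (s : Int) (b : PySem.Dict Int (List Char)),
      0 ≤ s → rows.drop s.toNat = tail →
      (((PySem.List.pyRange s (rows.length : Int) 1).foldl
        (fun (b : PySem.Dict Int (List Char)) r =>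
          (PySem.List.pyRange 0 (wn : Int) 1).foldl
            (fun (b : PySem.Dict Int (List Char)) c =>
              b.modify (c - r) [] (fun l => l ++ [PySem.List.pyGetD (PySem.List.pyGetD rows r []) c ' '])) b) b).getD d [])
      = b.getD d [] ++ diagSpec (wn : Int) tail (d + s) := by
  intro tail
  induction tail with
  | nil =>
      intro s b h0s hdrop
      have hle : (rows.length : Int) ≤ s := by
        have := List.drop_eq_nil_iff.mp hdrop
        omega
      rw [PySem.List.pyRange_one_eq_nil hle]
      simp [diagSpec]
  | cons row rest ih =>
      intro s b h0s hdrop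
      have hlt : s.toNat < rows.length := by
        by_contra h
        rw [List.drop_eq_nil_of_le (by omega)] at hdrop
        exact absurd hdrop.symm (List.cons_ne_nil _ _)
      have hcons := List.drop_eq_getElem_cons hlt
      rw [hdrop] at hcons
      have hrow : PySem.List.pyGetD rows s [] = row := by
        rw [PySem.List.pyGetD_eq_getElem rows [] h0s (by omega)]
        exact (List.cons.injEq _ _ _ _ ▸ hcons).1.symm
      have hrest : rows.drop (s + 1).toNat = rest := by
        have h1 : (s + 1).toNat = s.toNat + 1 := by omega
        rw [h1]
        exact ((List.cons.injEq _ _ _ _ ▸ hcons).2).symm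
      rw [PySem.List.pyRange_one_cons (show s < (rows.length : Int) by omega), List.foldl_cons,
          ih (s + 1) _ (by omega) hrest, inner_bucket (PySem.List.pyGetD rows s []) s d b wn,
          hrow]
      have e1 : d + (s + 1) = (d + s) + 1 := by ring
      rw [e1]
      simp [diagSpec, List.append_assoc]

-- ===== VERDICT (by name: the statement is the Claim_ definition above) =====
theorem core_eq (rows : List (List Char)) (wn : Nat) (h1 : 1 ≤ (wn : Int))
    (h2 : (wn : Int) ≤ (rows.length : Int) + 1) :
    ((PySem.List.pyRange 1 (wn : Int) 1).foldl (fun acc i =>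
        acc ++ [String.ofList (acrossGo rows (PySem.List.pyRange i (wn : Int) 1) 0),
                String.ofList (acrossGo rows (PySem.List.pyRange i (wn : Int) 1) 0).reverse])
      ((PySem.List.pyRange ((rows.length : Int) - 1) (-1) (-1)).foldl (fun acc j =>
        acc ++ [String.ofList (upGo rows (wn : Int) (PySem.List.pyRange j (rows.length : Int) 1) 0),
                String.ofList (upGo rows (wn : Int) (PySem.List.pyRange j (rows.length : Int) 1) 0).reverse]) []))
    = (PySem.List.pyRange (-((rows.length : Int) - 1)) (wn : Int) 1).foldl (fun acc d =>
        acc ++ [String.ofList (((PySem.List.pyRange 0 ((rows.length : Int)) 1).foldl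
            (fun (b : PySem.Dict Int (List Char)) r =>
              (PySem.List.pyRange 0 (wn : Int) 1).foldl
                (fun (b : PySem.Dict Int (List Char)) c =>
                  b.modify (c - r) [] (fun l => l ++ [PySem.List.pyGetD (PySem.List.pyGetD rows r []) c ' '])) b)
            PySem.Dict.empty).getD d []),
          String.ofList (((PySem.List.pyRange 0 ((rows.length : Int)) 1).foldl
            (fun (b : PySem.Dict Int (List Char)) r =>
              (PySem.List.pyRange 0 (wn : Int) 1).foldl
                (fun (b : PySem.Dict Int (List Char)) c =>
                  b.modify (c - r) [] (fun l => l ++ [PySem.List.pyGetD (PySem.List.pyGetD rows r []) c ' '])) b)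
            PySem.Dict.empty).getD d []).reverse]) [] := by
  have hbucket : ∀ d : Int,
      ((PySem.List.pyRange 0 ((rows.length : Int)) 1).foldl
        (fun (b : PySem.Dict Int (List Char)) r =>
          (PySem.List.pyRange 0 (wn : Int) 1).foldl
            (fun (b : PySem.Dict Int (List Char)) c =>
              b.modify (c - r) [] (fun l => l ++ [PySem.List.pyGetD (PySem.List.pyGetD rows r []) c ' '])) b)
        PySem.Dict.empty).getD d [] = diagSpec (wn : Int) rows d := by
    intro d
    rw [outer_bucket rows wn d rows 0 PySem.Dict.empty le_rfl (by simp), PySem.Dict.getD_empty]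
    simp
  rw [PySem.List.foldl_append_eq_flatMap, PySem.List.foldl_append_eq_flatMap,
      PySem.List.foldl_append_eq_flatMap, List.nil_append, List.nil_append]
  have hup : (PySem.List.pyRange ((rows.length : Int) - 1) (-1) (-1)).flatMap (fun j =>
        [String.ofList (upGo rows (wn : Int) (PySem.List.pyRange j (rows.length : Int) 1) 0),
         String.ofList (upGo rows (wn : Int) (PySem.List.pyRange j (rows.length : Int) 1) 0).reverse])
      = (PySem.List.pyRange ((rows.length : Int) - 1) (-1) (-1)).flatMap (fun j =>
        [String.ofList (diagSpec (wn : Int) rows (-j)),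
         String.ofList (diagSpec (wn : Int) rows (-j)).reverse]) := by
    apply flatMap_congr'
    intro j hj
    rw [PySem.List.mem_pyRange_neg_one] at hj
    have e : upGo rows (wn : Int) (PySem.List.pyRange j (rows.length : Int) 1) 0
        = diagSpec (wn : Int) rows (-j) := by
      rw [upGo_eq rows (wn : Int) (rows.drop j.toNat) j 0 (by omega) rfl le_rfl (by omega),
          ← diagSpec_neg]
      congr 1
      omega
    rw [e]
  have hacross : (PySem.List.pyRange 1 (wn : Int) 1).flatMap (fun i =>
        [String.ofList (acrossGo rows (PySem.List.pyRange i (wn : Int) 1) 0),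
         String.ofList (acrossGo rows (PySem.List.pyRange i (wn : Int) 1) 0).reverse])
      = (PySem.List.pyRange 1 (wn : Int) 1).flatMap (fun i =>
        [String.ofList (diagSpec (wn : Int) rows i),
         String.ofList (diagSpec (wn : Int) rows i).reverse]) := by
    apply flatMap_congr'
    intro i hi
    rw [PySem.List.mem_pyRange_one] at hi
    have e : acrossGo rows (PySem.List.pyRange i (wn : Int) 1) 0 = diagSpec (wn : Int) rows i := by
      exact acrossGo_eq rows (wn : Int) rows 0 i le_rfl (by simp) (by omega) (by omega)
    rw [e]
  have hB : (PySem.List.pyRange (-((rows.length : Int) - 1)) (wn : Int) 1).flatMap (fun d =>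
        [String.ofList (((PySem.List.pyRange 0 ((rows.length : Int)) 1).foldl
            (fun (b : PySem.Dict Int (List Char)) r =>
              (PySem.List.pyRange 0 (wn : Int) 1).foldl
                (fun (b : PySem.Dict Int (List Char)) c =>
                  b.modify (c - r) [] (fun l => l ++ [PySem.List.pyGetD (PySem.List.pyGetD rows r []) c ' '])) b)
            PySem.Dict.empty).getD d []),
          String.ofList (((PySem.List.pyRange 0 ((rows.length : Int)) 1).foldl
            (fun (b : PySem.Dict Int (List Char)) r =>
              (PySem.List.pyRange 0 (wn : Int) 1).foldl
                (fun (b : PySem.Dict Int (List Char)) c =>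
                  b.modify (c - r) [] (fun l => l ++ [PySem.List.pyGetD (PySem.List.pyGetD rows r []) c ' '])) b)
            PySem.Dict.empty).getD d []).reverse])
      = (PySem.List.pyRange (-((rows.length : Int) - 1)) (wn : Int) 1).flatMap (fun d =>
        [String.ofList (diagSpec (wn : Int) rows d),
         String.ofList (diagSpec (wn : Int) rows d).reverse]) := by
    apply flatMap_congr'
    intro d _
    rw [hbucket d]
  rw [hup, hacross, hB,
      PySem.List.pyRange_one_append (-((rows.length : Int) - 1)) 1 (wn : Int) (by omega) (by omega),
      List.flatMap_append]
  congr 1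
  rw [PySem.List.pyRange_neg_one, PySem.List.pyRange_one, List.flatMap_map, List.flatMap_map]
  have hr : ((rows.length : Int) - 1 - -1).toNat = ((1 : Int) - -((rows.length : Int) - 1)).toNat := by
    omega
  rw [hr]
  apply flatMap_congr'
  intro k _
  have e : -((rows.length : Int) - 1 - (k : Int)) = -((rows.length : Int) - 1) + (k : Int) := by ring
  rw [e]

theorem diag_down_slice_spec : Claim_equal_diag_down_slice := by
  intro lines _ hPre
  obtain ⟨hne, hw1, hw2, _⟩ := hPre
  unfold Spec_diag_down_slice
  cases lines with
  | nil => exact absurd rfl hne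
  | cons l ls =>
      rw [List.headD_cons, PySem.Str.len_eq] at hw1 hw2
      simp only [List.length_cons] at hw2
      have hget : PySem.List.pyGetD ((l :: ls).map String.toList) 0 [] = l.toList := by
        simp [PySem.List.pyGetD_zero_cons]
      simp only [diag_down_slice, diag_down_slice_alt]
      exact core_eq ((l :: ls).map String.toList)
        (PySem.List.pyGetD ((l :: ls).map String.toList) 0 []).length
        (by rw [hget]; exact_mod_cast hw1)
        (by rw [hget]; simp only [List.length_map, List.length_cons]; omega)

@[simp]
theorem diag_down_slice_raises : Claim_raises_diag_down_slice := by
  unfold Claim_raises_diag_down_slice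
  constructor
  · intro lines _ hR hP
    obtain ⟨_, _, h0⟩ := hR
    obtain ⟨_, h1, h2, _⟩ := hP
    omega
  · refine ⟨by decide, by decide, by decide⟩
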